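-- pv_equiv track=rewrite | github.com/xvlincaigou/caigode | src/caigode/application/agent_service.py | _render_transcript_for_summary
-- ===== SOURCE A (Python) =====
-- SUMMARY_CHAR_BUDGET = 24000
--
-- def _render_transcript_for_summary(messages: list[dict[str, str]]) -> str:
--     lines: list[str] = []
--     current = 0
--     for msg in reversed(messages):
--         role = msg.get("role", "unknown")
--         content = msg.get("content", "")
--         rendered = f"[{role}]\n{content}\n"
--         if current + len(rendered) > SUMMARY_CHAR_BUDGET:
--             break
--         lines.append(rendered)
--         current += len(rendered)
--     lines.reverse()
--     return "\n".join(lines)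
-- ===== SOURCE B (Python) =====
-- SUMMARY_CHAR_BUDGET = 24000
--
-- def _render_transcript_for_summary(messages: list[dict[str, str]]) -> str:
--     rendered = [f"[{m.get('role', 'unknown')}]\n{m.get('content', '')}\n" for m in messages]
--     total = sum(map(len, rendered))
--     i = 0
--     while total > SUMMARY_CHAR_BUDGET:
--         total -= len(rendered[i])
--         i += 1
--     return "\n".join(rendered[i:])
-- ===== Notes on version B (the rewrite author's own statement) =====
-- stated objective: alternative
-- what changed: Instead of accumulating rendered messages back-to-front with an early break and reversing, B renders all messages once in order, sums their lengths, and trims whole messages from the front while the total exceeds SUMMARY_CHAR_BUDGET, then joins the remaining suffix.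
import Mathlib
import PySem

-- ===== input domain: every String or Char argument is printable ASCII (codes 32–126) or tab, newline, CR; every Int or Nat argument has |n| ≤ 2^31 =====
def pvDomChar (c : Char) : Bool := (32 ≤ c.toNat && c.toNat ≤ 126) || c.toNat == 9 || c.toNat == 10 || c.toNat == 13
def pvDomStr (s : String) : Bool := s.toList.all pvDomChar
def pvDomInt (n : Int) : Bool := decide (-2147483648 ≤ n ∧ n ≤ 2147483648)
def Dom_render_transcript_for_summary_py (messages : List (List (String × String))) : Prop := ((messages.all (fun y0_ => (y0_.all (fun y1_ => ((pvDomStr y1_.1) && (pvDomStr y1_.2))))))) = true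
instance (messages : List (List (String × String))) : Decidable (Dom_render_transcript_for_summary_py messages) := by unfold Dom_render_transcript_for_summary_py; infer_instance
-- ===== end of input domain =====

-- B renders every message once, sums the lengths, and trims whole messages from the
-- front while the total exceeds the budget (alternative decomposition, same cost);
-- the return value is proved identical to A's reverse-accumulate-with-break.

-- ===== PORT A =====
-- the reverse loop: lines/current accumulators, break = return lines
def pvALoop (msgs : List (List (String × String))) (lines : List String) (current : Int) : List String :=
  match msgs with
  | [] => lines
  | m :: rest =>
    let role := (PySem.Dict.ofList m).getD "role" "unknown"
    let content := (PySem.Dict.ofList m).getD "content" ""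
    let rendered := PySem.Str.join "" ["[", role, "]\n", content, "\n"]  -- f"[{role}]\n{content}\n"
    if current + PySem.Str.len rendered > 24000 then lines
    else pvALoop rest (lines ++ [rendered]) (current + PySem.Str.len rendered)

def render_transcript_for_summary_py (messages : List (List (String × String))) : String :=
  PySem.Str.join "\n" (pvALoop messages.reverse [] 0).reverse

-- ===== PORT B =====
-- the while loop: index i into rendered ≡ dropping the head; total is the remaining sum
def pvTrimLoop (rs : List String) (total : Int) : List String :=
  match rs with
  | [] => rs
  | x :: rest => if total > 24000 then pvTrimLoop rest (total - PySem.Str.len x) else rs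

def render_transcript_for_summary_py_alt (messages : List (List (String × String))) : String :=
  let rendered := messages.map (fun m =>
    PySem.Str.join "" ["[", (PySem.Dict.ofList m).getD "role" "unknown", "]\n", (PySem.Dict.ofList m).getD "content" "", "\n"])
  let total := (rendered.map PySem.Str.len).sum
  PySem.Str.join "\n" (pvTrimLoop rendered total)

-- ===== PRECONDITION & SPEC =====
def Spec_render_transcript_for_summary_py (messages : List (List (String × String))) (out : String) : Prop := out = render_transcript_for_summary_py_alt messages
instance (messages : List (List (String × String))) (out : String) : Decidable (Spec_render_transcript_for_summary_py messages out) := by unfold Spec_render_transcript_for_summary_py; infer_instance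

-- ===== CLAIM (what is proved, stated in full; the proofs are below) =====
def Claim_equal_render_transcript_for_summary_py : Prop := ∀ (messages : List (List (String × String))), Dom_render_transcript_for_summary_py messages → Spec_render_transcript_for_summary_py messages (render_transcript_for_summary_py messages)

-- ===== LEMMAS AND PROOFS =====

-- the rendered string of one message (both ports compute exactly this expression)
def pvRender (m : List (String × String)) : String :=
  PySem.Str.join "" ["[", (PySem.Dict.ofList m).getD "role" "unknown", "]\n", (PySem.Dict.ofList m).getD "content" "", "\n"]

-- A's loop with the accumulator split off: take from the front while the budget allows
def pvTakeS (rs : List String) (c : Int) : List String :=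
  match rs with
  | [] => []
  | x :: rest =>
    if c + PySem.Str.len x > 24000 then []
    else x :: pvTakeS rest (c + PySem.Str.len x)

theorem pvLen_nonneg (s : String) : 0 ≤ PySem.Str.len s := by
  simp [PySem.Str.len]

theorem pvSum_nonneg (l : List String) : 0 ≤ (l.map PySem.Str.len).sum := by
  induction l with
  | nil => simp
  | cons x xs ih => simpa using add_nonneg (pvLen_nonneg x) ih

theorem pvALoop_eq (msgs : List (List (String × String))) :
    ∀ lines c, pvALoop msgs lines c = lines ++ pvTakeS (msgs.map pvRender) c := by
  induction msgs with
  | nil => intro lines c; simp [pvALoop, pvTakeS]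
  | cons m rest ih =>
    intro lines c
    simp only [pvALoop, pvTakeS, List.map_cons, pvRender]
    split
    · simp
    · rw [ih]; simp

theorem pvTrimLoop_of_le (l : List String) (t : Int) (h : t ≤ 24000) :
    pvTrimLoop l t = l := by
  cases l with
  | nil => rfl
  | cons x rest => simp [pvTrimLoop]; omega

theorem pvTakeS_append_singleton (ys : List String) :
    ∀ c x, pvTakeS (ys ++ [x]) c =
      pvTakeS ys c ++
        (if c + (ys.map PySem.Str.len).sum + PySem.Str.len x ≤ 24000 then [x] else []) := by
  induction ys with
  | nil =>
    intro c x
    simp only [List.nil_append, pvTakeS, List.map_nil, List.sum_nil, add_zero]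
    by_cases h : c + PySem.Str.len x > 24000
    · rw [if_pos h, if_neg (by omega)]
    · rw [if_neg h, if_pos (by omega)]
  | cons y ys' ih =>
    intro c x
    simp only [List.cons_append, pvTakeS, List.map_cons, List.sum_cons]
    by_cases h : c + PySem.Str.len y > 24000
    · have h1 := pvSum_nonneg ys'
      have h2 := pvLen_nonneg x
      rw [if_pos h, if_pos h, if_neg (by omega)]
      simp
    · rw [if_neg h, if_neg h, ih]
      have harr : c + PySem.Str.len y + (ys'.map PySem.Str.len).sum =
          c + (PySem.Str.len y + (ys'.map PySem.Str.len).sum) := by ring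
      rw [harr]
      simp

theorem pvMain (l : List String) :
    ∀ c, (pvTakeS l.reverse c).reverse = pvTrimLoop l ((l.map PySem.Str.len).sum + c) := by
  induction l with
  | nil => intro c; simp [pvTakeS, pvTrimLoop]
  | cons x xs ih =>
    intro c
    have hx := pvLen_nonneg x
    have hs := pvSum_nonneg xs
    rw [List.reverse_cons, pvTakeS_append_singleton, List.map_reverse, List.sum_reverse]
    simp only [List.map_cons, List.sum_cons, pvTrimLoop]
    by_cases h : PySem.Str.len x + (xs.map PySem.Str.len).sum + c > 24000
    · rw [if_neg (by omega), if_pos h]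
      simp only [List.append_nil, ih]
      congr 1
      omega
    · rw [if_pos (by omega), if_neg h]
      simp only [List.reverse_append, List.reverse_cons, List.reverse_nil, List.nil_append,
        List.singleton_append, ih]
      rw [pvTrimLoop_of_le _ _ (by omega)]

-- ===== VERDICT (by name: the statement is the Claim_ definition above) =====
theorem render_transcript_for_summary_py_spec : Claim_equal_render_transcript_for_summary_py := by
  intro messages _
  show render_transcript_for_summary_py messages = render_transcript_for_summary_py_alt messages
  unfold render_transcript_for_summary_py render_transcript_for_summary_py_alt
  rw [pvALoop_eq, List.nil_append, List.map_reverse, pvMain]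
  unfold pvRender
  rw [Int.add_zero]
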